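-- pv_equiv track=rewrite | github.com/STRrrrr3/PaperAlchemy | src/page_validation.py | is_safe_anchored_selector
-- ===== SOURCE A (Python) =====
-- def is_safe_anchored_selector(selector: str, allowed_anchor_selectors: set[str]) -> bool:
--     clean = str(selector or "").strip()
--     if not clean:
--         return False
--     if any(token in clean for token in (",", "{", "}", "@", "\n", "\r", ";")):
--         return False
--
--     for anchor in allowed_anchor_selectors:
--         if clean == anchor:
--             return True
--         if not clean.startswith(anchor):
--             continue
--         suffix = clean[len(anchor) :]
--         if not suffix:
--             return True
--         if suffix[0] in (" ", ">", "+", "~", ":", "[", ".", "#"):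
--             return True
--     return False
-- ===== SOURCE B (Python) =====
-- def is_safe_anchored_selector(selector: str, allowed_anchor_selectors: set[str]) -> bool:
--     clean = str(selector or "").strip()
--     if not clean:
--         return False
--     if any(token in clean for token in (",", "{", "}", "@", "\n", "\r", ";")):
--         return False
--
--     allowed = set(allowed_anchor_selectors)
--     seps = " >+~:[.#"
--     for i in range(len(clean) + 1):
--         if i == len(clean) or clean[i] in seps:
--             if clean[:i] in allowed:
--                 return True
--     return False
-- ===== Notes on version B (the rewrite author's own statement) =====
-- stated objective: alternative
-- what changed: Instead of scanning every allowed anchor with startswith and slicing off a suffix, B scans the boundary positions of the cleaned selector (end of string or a separator character) and tests whether the prefix up to each boundary is a member of the anchor set.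
import Mathlib
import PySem

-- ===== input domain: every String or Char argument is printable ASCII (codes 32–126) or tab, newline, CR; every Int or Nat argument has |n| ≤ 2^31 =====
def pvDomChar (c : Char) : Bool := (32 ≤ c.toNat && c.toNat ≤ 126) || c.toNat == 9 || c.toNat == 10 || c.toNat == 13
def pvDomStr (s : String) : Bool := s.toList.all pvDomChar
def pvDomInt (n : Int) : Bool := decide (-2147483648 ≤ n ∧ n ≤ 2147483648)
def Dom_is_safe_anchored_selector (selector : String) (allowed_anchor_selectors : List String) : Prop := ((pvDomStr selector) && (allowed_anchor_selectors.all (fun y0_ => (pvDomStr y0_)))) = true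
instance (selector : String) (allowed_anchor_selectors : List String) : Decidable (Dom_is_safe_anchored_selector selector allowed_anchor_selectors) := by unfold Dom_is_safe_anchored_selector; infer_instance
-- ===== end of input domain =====

-- B scans separator-delimited prefixes of the selector and looks them up in the anchor set, instead of
-- A's startswith scan over every anchor; objective: alternative decomposition (same observable result).

-- ===== PORT A =====
-- forbidden single-character tokens (",", "{", "}", "@", "\n", "\r", ";")
def pvForbidden : List Char := [',', '{', '}', '@', '\n', '\r', ';']
-- separator characters (" ", ">", "+", "~", ":", "[", ".", "#")
def pvSeps : List Char := [' ', '>', '+', '~', ':', '[', '.', '#']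

-- the body of A's 'for anchor in allowed_anchor_selectors' loop (True = return True, False = continue)
def pvACheck (clean : List Char) (anchor : List Char) : Bool :=
  if clean == anchor then true
  else if !(PySem.Chars.startswith clean anchor) then false
  else
    let suffix := PySem.List.slice clean (some (anchor.length : Int)) none
    match suffix with
    | [] => true
    | c :: _ => pvSeps.contains c

def is_safe_anchored_selector (selector : String) (allowed_anchor_selectors : List String) : Bool :=
  let clean := PySem.Chars.strip selector.toList
  if clean == [] then false
  else if pvForbidden.any (fun t => PySem.Chars.isIn [t] clean) then false
  else allowed_anchor_selectors.any (fun anchor => pvACheck clean anchor.toList)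

-- ===== PORT B =====
def is_safe_anchored_selector_alt (selector : String) (allowed_anchor_selectors : List String) : Bool :=
  let clean := PySem.Chars.strip selector.toList
  if clean == [] then false
  else if pvForbidden.any (fun t => PySem.Chars.isIn [t] clean) then false
  else
    let allowed := PySem.Set.ofList (allowed_anchor_selectors.map String.toList)
    (PySem.List.pyRange 0 ((clean.length : Int) + 1) 1).any (fun i =>
      (i == (clean.length : Int) || pvSeps.contains (PySem.List.pyGetD clean i 'x')) &&
      PySem.Set.contains allowed (PySem.List.slice clean none (some i)))

-- ===== PRECONDITION & SPEC =====
def Spec_is_safe_anchored_selector (selector : String) (allowed_anchor_selectors : List String) (out : Bool) : Prop := out = is_safe_anchored_selector_alt selector allowed_anchor_selectors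
instance (selector : String) (allowed_anchor_selectors : List String) (out : Bool) : Decidable (Spec_is_safe_anchored_selector selector allowed_anchor_selectors out) := by unfold Spec_is_safe_anchored_selector; infer_instance

-- ===== CLAIM (what is proved, stated in full; the proofs are below) =====
def Claim_equal_is_safe_anchored_selector : Prop := ∀ (selector : String) (allowed_anchor_selectors : List String), Dom_is_safe_anchored_selector selector allowed_anchor_selectors → Spec_is_safe_anchored_selector selector allowed_anchor_selectors (is_safe_anchored_selector selector allowed_anchor_selectors)

-- ===== LEMMAS AND PROOFS =====

-- characterisation of A's per-anchor test
lemma pvACheck_iff (clean a : List Char) :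
    pvACheck clean a = true ↔
      a <+: clean ∧ (a.length = clean.length ∨
        ∃ c, clean[a.length]? = some c ∧ pvSeps.contains c = true) := by
  unfold pvACheck
  rw [PySem.List.slice_from_natCast]
  by_cases heq : clean = a
  · subst heq
    simp
  · rw [if_neg (by simpa using heq)]
    by_cases hsw : a <+: clean
    · rw [if_neg (by simp [PySem.Chars.startswith_iff, hsw])]
      have hle : a.length ≤ clean.length := hsw.length_le
      rcases hd : clean.drop a.length with _ | ⟨c, rest⟩
      · have hlen : a.length = clean.length := by
          have := congrArg List.length hd
          simp at this
          omega
        simp [hsw, hlen]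
      · have hgc : clean[a.length]? = some c := by
          rw [← List.head?_drop, hd]
          rfl
        have hlt : a.length < clean.length := by
          have := congrArg List.length hd
          simp at this
          omega
        simp only [hgc]
        constructor
        · intro hc
          exact ⟨hsw, Or.inr ⟨c, rfl, hc⟩⟩
        · rintro ⟨-, h | ⟨c', hc', hmem⟩⟩
          · omega
          · cases Option.some.inj hc'
            exact hmem
    · have hf : PySem.Chars.startswith clean a = false := by
        rw [Bool.eq_false_iff]
        simpa [PySem.Chars.startswith_iff] using hsw
      rw [if_pos (by simp [hf])]
      simp [hsw]


-- membership form of B's set lookup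
lemma pvContains_iff (allowed : List String) (x : List Char) :
    PySem.Set.contains (PySem.Set.ofList (allowed.map String.toList)) x = true ↔
      ∃ s ∈ allowed, s.toList = x := by
  simp [PySem.Set.contains, PySem.Set.mem_ofList]

-- the two loop strategies agree on the anchor search
lemma pv_core (clean : List Char) (allowed : List String) :
    allowed.any (fun anchor => pvACheck clean anchor.toList) =
    (PySem.List.pyRange 0 ((clean.length : Int) + 1) 1).any (fun i =>
      (i == (clean.length : Int) || pvSeps.contains (PySem.List.pyGetD clean i 'x')) &&
      PySem.Set.contains (PySem.Set.ofList (allowed.map String.toList)) (PySem.List.slice clean none (some i))) := by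
  rw [Bool.eq_iff_iff]
  simp only [List.any_eq_true, Bool.and_eq_true, Bool.or_eq_true, beq_iff_eq, pvACheck_iff,
    pvContains_iff]
  constructor
  · rintro ⟨s, hs, hpre, hcond⟩
    have hle : s.toList.length ≤ clean.length := hpre.length_le
    refine ⟨(s.toList.length : Int), ?_, ?_, ?_⟩
    · rw [PySem.List.mem_pyRange_one]
      exact ⟨by positivity, by exact_mod_cast Nat.lt_succ_of_le hle⟩
    · rcases hcond with h | ⟨c, hc, hmem⟩
      · left
        exact_mod_cast h
      · right
        rw [PySem.List.pyGetD_natCast, List.getD_eq_getElem?_getD, hc]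
        exact hmem
    · rw [PySem.List.slice_to clean (by positivity), Int.toNat_natCast,
        ← List.prefix_iff_eq_take.mp hpre]
      exact ⟨s, hs, rfl⟩
  · rintro ⟨i, hi, hbnd, hmem⟩
    rw [PySem.List.mem_pyRange_one] at hi
    obtain ⟨hi0, hi1⟩ := hi
    set j : Nat := i.toNat with hj
    have hij : i = (j : Int) := by omega
    have hjle : j ≤ clean.length := by omega
    rw [PySem.List.slice_to clean hi0] at hmem
    obtain ⟨s, hs, hsl⟩ := hmem
    have hslen : s.toList.length = j := by
      rw [hsl, List.length_take]
      omega
    have hpre : s.toList <+: clean := by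
      rw [hsl]
      exact List.take_prefix j clean
    refine ⟨s, hs, hpre, ?_⟩
    by_cases hjlen : j = clean.length
    · left
      omega
    · have hjlt : j < clean.length := by omega
      rcases hbnd with h | h
      · omega
      · right
        rw [hij, PySem.List.pyGetD_natCast, List.getD_eq_getElem?_getD,
          List.getElem?_eq_getElem hjlt] at h
        refine ⟨clean[j], ?_, by simpa using h⟩
        rw [hslen]
        exact List.getElem?_eq_getElem hjlt

-- ===== VERDICT (by name: the statement is the Claim_ definition above) =====
theorem is_safe_anchored_selector_spec : Claim_equal_is_safe_anchored_selector := by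
  intro selector allowed _
  unfold Spec_is_safe_anchored_selector is_safe_anchored_selector is_safe_anchored_selector_alt
  by_cases h1 : PySem.Chars.strip selector.toList == []
  · simp only [h1, if_true]
  · simp only [h1]
    by_cases h2 : pvForbidden.any (fun t => PySem.Chars.isIn [t] (PySem.Chars.strip selector.toList)) = true
    · simp only [h2, if_true]
    · simp only [h2]
      exact pv_core _ _
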